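-- pv_equiv track=rewrite | github.com/zashary/discord-bot | discord_bot/cogs/plugins/music.py | get_table_view
-- ===== SOURCE A (Python) =====
-- def get_table_view(items, max_rows=15):
--     '''
--     Common function for queue printing
--     max_rows    :   Only show max rows in a single print
--     '''
--     current_index = 0
--     table_strings = []
--
--     if not items:
--         return None
--
--     # Assume first column is short index name
--     # Second column is longer title name
--     while True:
--         table = ''
--         for (count, item) in enumerate(items[current_index:]):
--             table = f'{table}\n{count + current_index + 1:3} || {item:64}'
--             if count >= max_rows - 1:
--                 break
--         table_strings.append(f'```\n{table}\n```')
--         current_index += max_rows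
--         if current_index >= len(items):
--             break
--     return table_strings
-- ===== SOURCE B (Python) =====
-- def get_table_view(items, max_rows=15):
--     '''
--     Common function for queue printing
--     max_rows    :   Only show max rows in a single print
--     '''
--     if not items:
--         return None
--     rows = [f'\n{i + 1:3} || {item:64}' for i, item in enumerate(items)]
--     return [f'```\n{"".join(rows[i:i + max_rows])}\n```'
--             for i in range(0, len(items), max_rows)]
-- ===== Notes on version B (the rewrite author's own statement) =====
-- stated objective: faster
-- what changed: Replaces the nested while/for with a manual running index, per-block cumulative string concatenation and repeated slicing of the whole tail by a two-pass materialize-then-reshape: format every row once, then slice the row list into max_rows-sized blocks.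
import Mathlib
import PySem

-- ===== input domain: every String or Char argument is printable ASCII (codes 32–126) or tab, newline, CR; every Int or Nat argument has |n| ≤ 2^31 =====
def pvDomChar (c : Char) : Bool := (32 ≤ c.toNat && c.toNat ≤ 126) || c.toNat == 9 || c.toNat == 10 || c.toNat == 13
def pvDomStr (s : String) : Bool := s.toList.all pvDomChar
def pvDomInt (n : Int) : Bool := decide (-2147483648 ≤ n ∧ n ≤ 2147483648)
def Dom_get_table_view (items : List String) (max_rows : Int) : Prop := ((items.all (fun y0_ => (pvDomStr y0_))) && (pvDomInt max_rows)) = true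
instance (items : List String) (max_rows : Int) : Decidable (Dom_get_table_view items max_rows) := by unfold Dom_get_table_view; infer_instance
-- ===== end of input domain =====

-- B replaces A's nested while/for with a running index and cumulative concatenation by a
-- two-pass structure: format all rows once, then slice the row list into max_rows-sized blocks.


-- ===== PORT A =====
-- f'{idx:3} || {item:64}' preceded by '\n': int right-justified to width 3, str
-- left-justified to width 64, space padding (exact for the ASCII domain; both
-- Pythons contain this identical f-string, so the helper is shared).
def fmtRow (idx : Int) (item : String) : String :=
  "\n" ++ String.ofList (List.replicate (3 - (PySem.Int.toStr idx).length) ' ') ++ PySem.Int.toStr idx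
    ++ " || " ++ item ++ String.ofList (List.replicate (64 - item.length) ' ')

-- the inner 'for (count, item) in enumerate(items[current_index:])' with its break
def innerA (mr ci : Int) : List String → Int → String → String
  | [], _, table => table
  | item :: rest, count, table =>
    let table := table ++ fmtRow (count + ci + 1) item
    if count ≥ mr - 1 then table else innerA mr ci rest (count + 1) table

-- the 'while True' loop; fuel = items.length bounds the iterations (each one advances
-- current_index by max_rows ≥ 1 under Pre_), it is never exhausted on Pre_ inputs
def outerA (items : List String) (mr : Int) : Nat → Int → List String → List String
  | 0, _, acc => acc
  | fuel+1, ci, acc =>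
    let table := innerA mr ci (PySem.List.slice items (some ci) none) 0 ""
    let acc2 := acc ++ ["```\n" ++ table ++ "\n```"]
    if ci + mr ≥ (items.length : Int) then acc2 else outerA items mr fuel (ci + mr) acc2

def get_table_view (items : List String) (max_rows : Int) : Option (List String) :=
  if items = [] then none
  else some (outerA items max_rows items.length 0 [])

-- ===== PORT B =====
def get_table_view_alt (items : List String) (max_rows : Int) : Option (List String) :=
  if items = [] then none
  else
    let rows := (PySem.List.enumerate items 0).map (fun p => fmtRow (p.1 + 1) p.2)
    some ((PySem.List.pyRange 0 (items.length : Int) max_rows).map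
      (fun i => "```\n" ++ String.join (PySem.List.slice rows (some i) (some (i + max_rows))) ++ "\n```"))

-- ===== PRECONDITION & SPEC =====
-- Pre_ excludes max_rows ≤ 0 with a nonempty items, where A never returns (the while
-- loop runs forever: current_index never reaches len(items)).
def Pre_get_table_view (items : List String) (max_rows : Int) : Prop :=
  items = [] ∨ 1 ≤ max_rows
instance (items : List String) (max_rows : Int) : Decidable (Pre_get_table_view items max_rows) := by
  unfold Pre_get_table_view; infer_instance

def pvWitness_get_table_view : List String × Int := (["alpha", "beta", "c"], 2)

def Spec_get_table_view (items : List String) (max_rows : Int) (out : Option (List String)) : Prop := out = get_table_view_alt items max_rows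
instance (items : List String) (max_rows : Int) (out : Option (List String)) : Decidable (Spec_get_table_view items max_rows out) := by unfold Spec_get_table_view; infer_instance

-- ===== CLAIM (what is proved, stated in full; the proofs are below) =====
def Claim_equal_get_table_view : Prop := ∀ (items : List String) (max_rows : Int), Dom_get_table_view items max_rows → Pre_get_table_view items max_rows → Spec_get_table_view items max_rows (get_table_view items max_rows)

-- ===== LEMMAS AND PROOFS =====

-- the list of formatted rows of l, the k-th row carrying index base+k+1
def rowsOf : List String → Int → List String
  | [], _ => []
  | x :: xs, base => fmtRow (base + 1) x :: rowsOf xs (base + 1)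

theorem foldl_append_str (l : List String) (x : String) :
    l.foldl (· ++ ·) x = x ++ l.foldl (· ++ ·) "" := by
  induction l generalizing x with
  | nil => simp [List.foldl, String.append_empty]
  | cons a l ih =>
    simp only [List.foldl]
    rw [ih (x ++ a), ih ("" ++ a), String.empty_append, String.append_assoc]

theorem join_cons (a : String) (l : List String) :
    String.join (a :: l) = a ++ String.join l := by
  simp only [String.join, List.foldl]
  rw [foldl_append_str l ("" ++ a), String.empty_append]

theorem join_nil_str : String.join ([] : List String) = "" := rfl

theorem rowsOf_take (l : List String) : ∀ (m : Nat) (base : Int),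
    rowsOf (l.take m) base = (rowsOf l base).take m := by
  induction l with
  | nil => intro m base; simp [rowsOf]
  | cons x xs ih =>
    intro m base
    cases m with
    | zero => simp [rowsOf]
    | succ k => simp [rowsOf, List.take_succ_cons, ih k]

theorem rowsOf_drop (l : List String) : ∀ (m : Nat) (base : Int),
    rowsOf (l.drop m) (base + m) = (rowsOf l base).drop m := by
  induction l with
  | nil => intro m base; simp [rowsOf]
  | cons x xs ih =>
    intro m base
    cases m with
    | zero => simp [rowsOf]
    | succ k =>
      simp only [List.drop_succ_cons, rowsOf]
      have := ih k (base + 1)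
      rw [show base + (↑(k + 1) : Int) = base + 1 + ↑k by push_cast; ring]
      simpa using this

theorem enum_rowsOf (l : List String) : ∀ (s : Int),
    (PySem.List.enumerate l s).map (fun p => fmtRow (p.1 + 1) p.2) = rowsOf l s := by
  induction l with
  | nil => intro s; simp [PySem.List.enumerate_nil, rowsOf]
  | cons x xs ih =>
    intro s
    rw [PySem.List.enumerate_cons]
    simp only [List.map_cons, rowsOf, ih (s + 1)]

theorem inner_eq (mr ci : Int) : ∀ (l : List String) (count : Int) (t : String),
    0 ≤ count → count ≤ mr - 1 →
    innerA mr ci l count t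
      = t ++ String.join (rowsOf (l.take (mr - count).toNat) (ci + count)) := by
  intro l
  induction l with
  | nil =>
    intro count t _ _
    simp [innerA, rowsOf, join_nil_str, String.append_empty]
  | cons item rest ih =>
    intro count t h0 h1
    have hk : (mr - count).toNat = (mr - count - 1).toNat + 1 := by omega
    rw [hk, List.take_succ_cons]
    simp only [innerA, rowsOf, join_cons]
    rw [show ci + count + 1 = count + ci + 1 by ring]
    split_ifs with hc
    · have : (mr - count - 1).toNat = 0 := by omega
      rw [this]
      simp [rowsOf, join_nil_str, String.append_empty]
    · rw [ih (count + 1) (t ++ fmtRow (count + ci + 1) item) (by omega) (by omega)]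
      rw [show mr - (count + 1) = mr - count - 1 by ring,
          show ci + (count + 1) = ci + count + 1 by ring,
          show ci + count + 1 = count + ci + 1 by ring, String.append_assoc]

theorem pyRange_pos_nil {a b s : Int} (hs : 0 < s) (h : b ≤ a) :
    PySem.List.pyRange a b s = [] := by
  rw [PySem.List.pyRange_of_pos a b hs, if_neg (by omega)]
  simp

theorem pyRange_pos_cons {a b s : Int} (hs : 0 < s) (h : a < b) :
    PySem.List.pyRange a b s = a :: PySem.List.pyRange (a + s) b s := by
  rw [PySem.List.pyRange_of_pos a b hs, PySem.List.pyRange_of_pos (a + s) b hs, if_pos h]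
  have hcount : (if a + s < b then ((b - (a + s) + s - 1) / s).toNat else 0) + 1
      = ((b - a + s - 1) / s).toNat := by
    split_ifs with h2
    · have heq : b - a + s - 1 = (b - (a + s) + s - 1) + 1 * s := by ring
      rw [heq, Int.add_mul_ediv_right _ _ (by omega : s ≠ 0)]
      have hnn : 0 ≤ (b - (a + s) + s - 1) / s :=
        Int.ediv_nonneg (by omega) (by omega)
      omega
    · have h1 : 1 ≤ (b - a + s - 1) / s := by
        rw [Int.le_ediv_iff_mul_le hs]; omega
      have h2' : (b - a + s - 1) / s < 2 := by
        rw [Int.ediv_lt_iff_lt_mul hs]; omega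
      omega
  rw [← hcount, List.range_succ_eq_map, List.map_cons, List.map_map]
  congr 1
  · simp
  · exact List.map_congr_left (fun k _ => by simp [Function.comp]; ring)

theorem outer_eq (items : List String) (mr : Int) (hmr : 1 ≤ mr) :
    ∀ (fuel : Nat) (ci : Int) (acc : List String),
    0 ≤ ci → ci < (items.length : Int) → (items.length : Int) - ci ≤ fuel →
    outerA items mr fuel ci acc
      = acc ++ (PySem.List.pyRange ci (items.length : Int) mr).map
          (fun i => "```\n" ++ String.join
              (PySem.List.slice (rowsOf items 0) (some i) (some (i + mr))) ++ "\n```") := by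
  intro fuel
  induction fuel with
  | zero => intro ci acc h0 h1 h2; omega
  | succ fuel ih =>
    intro ci acc h0 h1 h2
    simp only [outerA]
    have hslice : PySem.List.slice items (some ci) none = items.drop ci.toNat :=
      PySem.List.slice_from items h0
    have htable : innerA mr ci (PySem.List.slice items (some ci) none) 0 ""
        = String.join (rowsOf ((items.drop ci.toNat).take mr.toNat) ci) := by
      rw [hslice, inner_eq mr ci _ 0 "" le_rfl (by omega), String.empty_append]
      norm_num
    have hblock : rowsOf ((items.drop ci.toNat).take mr.toNat) ci
        = PySem.List.slice (rowsOf items 0) (some ci) (some (ci + mr)) := by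
      rw [PySem.List.slice_toNat _ h0 (by omega)]
      have hd : rowsOf (items.drop ci.toNat) ci = (rowsOf items 0).drop ci.toNat := by
        have := rowsOf_drop items ci.toNat 0
        rw [show (0 : Int) + (ci.toNat : Int) = ci by omega] at this
        exact this
      rw [rowsOf_take, hd, show (ci + mr).toNat - ci.toNat = mr.toNat by omega]
    have hcons := pyRange_pos_cons (a := ci) (b := (items.length : Int)) (s := mr)
      (by omega) h1
    rw [htable, hblock, hcons, List.map_cons]
    split_ifs with hend
    · rw [pyRange_pos_nil (by omega) (by omega), List.map_nil]
    · rw [ih (ci + mr) _ (by omega) (by omega) (by omega), List.append_assoc,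
        List.singleton_append]

-- ===== VERDICT (by name: the statement is the Claim_ definition above) =====
theorem get_table_view_spec : Claim_equal_get_table_view := by
  intro items max_rows _ hpre
  unfold Spec_get_table_view
  by_cases h : items = []
  · simp [get_table_view, get_table_view_alt, h]
  · have hmr : 1 ≤ max_rows := by
      rcases hpre with h' | h'
      · exact absurd h' h
      · exact h'
    have hlen : 1 ≤ items.length := by
      cases items with
      | nil => exact absurd rfl h
      | cons a l => simp
    simp only [get_table_view, get_table_view_alt, if_neg h]
    rw [enum_rowsOf items 0,
      outer_eq items max_rows hmr items.length 0 [] le_rfl (by exact_mod_cast hlen)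
        (by omega), List.nil_append]
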